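-- pv_equiv track=rewrite | github.com/ODooHo/Algorithm | BJ/NB.py | check_strike_ball
-- ===== SOURCE A (Python) =====
-- def check_strike_ball(secret_number,answer_number):
--     strike = 0
--     ball = 0
--     for i in range(len(secret_number)):
--         for j in range(len(secret_number)):
--             if secret_number[i] == answer_number[j]:
--                 if i == j:
--                     strike +=1
--                 else:
--                     ball +=1
--     return [strike,ball]
-- ===== SOURCE B (Python) =====
-- def check_strike_ball(secret_number, answer_number):
--     n = len(secret_number)
--     ans = answer_number[:n]
--     strike = 0
--     for s, a in zip(secret_number, ans):
--         if s == a: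
--             strike += 1
--     cnt = {}
--     for c in ans:
--         cnt[c] = cnt.get(c, 0) + 1
--     total = 0
--     for c in secret_number:
--         total += cnt.get(c, 0)
--     return [strike, total - strike]
-- ===== Notes on version B (the rewrite author's own statement) =====
-- stated objective: faster
-- what changed: Replaced the O(n^2) nested index loops with three linear passes: a positional zip pass for strikes, a digit-count dictionary over answer[:n], and ball = total value-matches minus strikes.
import Mathlib
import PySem

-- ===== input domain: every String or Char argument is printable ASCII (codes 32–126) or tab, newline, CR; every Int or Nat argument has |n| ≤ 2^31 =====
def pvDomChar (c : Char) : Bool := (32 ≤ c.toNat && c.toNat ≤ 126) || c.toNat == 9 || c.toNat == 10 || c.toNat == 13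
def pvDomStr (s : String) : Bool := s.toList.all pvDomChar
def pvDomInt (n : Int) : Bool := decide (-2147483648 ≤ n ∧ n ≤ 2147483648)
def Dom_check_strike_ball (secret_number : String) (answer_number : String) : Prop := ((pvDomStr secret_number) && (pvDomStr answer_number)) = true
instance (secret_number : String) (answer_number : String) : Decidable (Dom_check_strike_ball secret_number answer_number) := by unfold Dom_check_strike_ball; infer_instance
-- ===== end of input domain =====

-- B replaces A's O(n^2) nested index loops by three linear passes: a positional zip pass
-- for strikes, a character-count dict over answer_number[:n], and ball = total matches - strikes.

-- ===== PORT A =====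
def check_strike_ball (secret_number : String) (answer_number : String) : List Int :=
  let st :=
    (PySem.List.pyRange 0 (PySem.Str.len secret_number) 1).foldl (fun (st : Int × Int) i =>
      (PySem.List.pyRange 0 (PySem.Str.len secret_number) 1).foldl (fun (st : Int × Int) j =>
        if PySem.Str.pyGet? secret_number i = PySem.Str.pyGet? answer_number j then
          if i = j then (st.1 + 1, st.2) else (st.1, st.2 + 1)
        else st) st) (0, 0)
  [st.1, st.2]

-- ===== PORT B =====
def check_strike_ball_alt (secret_number : String) (answer_number : String) : List Int :=
  let n : Int := PySem.Str.len secret_number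
  let ans := PySem.Str.slice answer_number none (some n)
  let strike : Int :=
    (secret_number.toList.zip ans.toList).foldl
      (fun acc p => if p.1 = p.2 then acc + 1 else acc) 0
  let cnt : PySem.Dict Char Int :=
    ans.toList.foldl (fun d c => d.insert c (d.getD c 0 + 1)) PySem.Dict.empty
  let total : Int := secret_number.toList.foldl (fun acc c => acc + cnt.getD c 0) 0
  [strike, total - strike]

-- ===== PRECONDITION & SPEC =====
-- A indexes answer_number[j] for every j < len(secret_number): it raises IndexError
-- exactly when the answer is shorter than a non-empty secret; Pre_ admits everything else.
def Pre_check_strike_ball (secret_number : String) (answer_number : String) : Prop :=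
  secret_number.toList.length ≤ answer_number.toList.length
instance (secret_number : String) (answer_number : String) : Decidable (Pre_check_strike_ball secret_number answer_number) := by unfold Pre_check_strike_ball; infer_instance
def pvWitness_check_strike_ball : String × String := ("123", "321")

def Spec_check_strike_ball (secret_number : String) (answer_number : String) (out : List Int) : Prop := out = check_strike_ball_alt secret_number answer_number
instance (secret_number : String) (answer_number : String) (out : List Int) : Decidable (Spec_check_strike_ball secret_number answer_number out) := by unfold Spec_check_strike_ball; infer_instance

-- ===== CLAIM (what is proved, stated in full; the proofs are below) =====
def Claim_equal_check_strike_ball : Prop := ∀ (secret_number : String) (answer_number : String), Dom_check_strike_ball secret_number answer_number → Pre_check_strike_ball secret_number answer_number → Spec_check_strike_ball secret_number answer_number (check_strike_ball secret_number answer_number)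
-- ===== LEMMAS AND PROOFS =====

theorem pv_inner (c? : Option Char) (as0 : List Char) (n i : Nat) (x y : Int) :
    (List.range n).foldl (fun (st : Int × Int) j =>
        if c? = as0[j]? then (if i = j then (st.1 + 1, st.2) else (st.1, st.2 + 1)) else st)
      (x, y)
    = (x + (((List.range n).map (fun j => if c? = as0[j]? ∧ i = j then (1:Int) else 0)).sum),
       y + (((List.range n).map (fun j => if c? = as0[j]? ∧ i ≠ j then (1:Int) else 0)).sum)) := by
  have h1 := PySem.List.foldl_congr_mem (l := List.range n) (init := ((x, y) : Int × Int))
      (f := fun (st : Int × Int) j =>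
        if c? = as0[j]? then (if i = j then (st.1 + 1, st.2) else (st.1, st.2 + 1)) else st)
      (g := fun (st : Int × Int) j =>
        (st.1 + (if c? = as0[j]? ∧ i = j then (1:Int) else 0),
         st.2 + (if c? = as0[j]? ∧ i ≠ j then (1:Int) else 0)))
      (by intro acc j hj; beta_reduce; split_ifs <;> simp_all)
  rw [h1, PySem.List.foldl_prod_mk
      (f := fun acc j => acc + (if c? = as0[j]? ∧ i = j then (1:Int) else 0))
      (g := fun acc j => acc + (if c? = as0[j]? ∧ i ≠ j then (1:Int) else 0)),
    PySem.List.foldl_add, PySem.List.foldl_add]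

theorem pv_sum_ite_eq (n i : Nat) (p : Nat → Prop) [DecidablePred p] :
    ((List.range n).map (fun j => if p j ∧ i = j then (1:Int) else 0)).sum
    = if i < n ∧ p i then 1 else 0 := by
  induction n with
  | zero => simp
  | succ k ih =>
    rw [List.range_succ, List.map_append, List.sum_append, ih]
    simp only [List.map_cons, List.map_nil, List.sum_cons, List.sum_nil]
    by_cases hik : i = k
    · subst hik; split_ifs <;> simp_all
    · split_ifs <;> simp_all <;> omega

theorem pv_count (as0 : List Char) (n : Nat) (h : n ≤ as0.length) (v : Char) :
    ((List.range n).map (fun j => if some v = as0[j]? then (1:Int) else 0)).sum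
    = ((as0.take n).count v : Int) := by
  induction n with
  | zero => simp
  | succ k ih =>
    rw [List.range_succ, List.map_append, List.sum_append, ih (by omega)]
    have hk : k < as0.length := by omega
    have ht : as0.take (k+1) = as0.take k ++ [as0[k]] := by
      rw [List.take_add_one]; simp [List.getElem?_eq_getElem hk]
    rw [ht]
    simp only [List.map_cons, List.map_nil, List.sum_cons, List.sum_nil, add_zero,
      List.count_append, List.getElem?_eq_getElem hk]
    push_cast
    by_cases hv : as0[k] = v <;> simp [hv, eq_comm] <;> exact fun hvv => hv hvv.symm

theorem pv_zip (cs as0 : List Char) (h : cs.length ≤ as0.length) :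
    ((List.range cs.length).map (fun i => if cs[i]? = as0[i]? then (1:Int) else 0)).sum
    = ((cs.zip as0).countP (fun p => decide (p.1 = p.2)) : Int) := by
  induction cs generalizing as0 with
  | nil => simp
  | cons c cs ih =>
    cases as0 with
    | nil => simp at h
    | cons a as0 =>
      simp only [List.length_cons, List.range_succ_eq_map, List.map_cons, List.map_map,
        List.sum_cons, List.zip_cons_cons, List.countP_cons]
      have : ((List.range cs.length).map ((fun i => if (c :: cs)[i]? = (a :: as0)[i]? then (1:Int) else 0) ∘ Nat.succ)).sum
          = ((List.range cs.length).map (fun i => if cs[i]? = as0[i]? then (1:Int) else 0)).sum := by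
        apply congrArg; apply List.map_congr_left; intro j hj; simp
      rw [this, ih as0 (by simpa using h)]
      by_cases hca : c = a <;> simp [hca] <;> omega

theorem pv_map_range {α β : Type} (cs : List α) (f : Option α → β) :
    (List.range cs.length).map (fun i => f cs[i]?) = cs.map (fun c => f (some c)) := by
  induction cs with
  | nil => simp
  | cons c cs ih =>
    simp only [List.length_cons, List.range_succ_eq_map, List.map_cons, List.map_map]
    refine congrArg _ ?_
    rw [← ih]
    apply List.map_congr_left; intro j hj; simp

theorem pv_sum_map_sub {α : Type} (l : List α) (f g : α → Int) :
    (l.map (fun x => f x - g x)).sum = (l.map f).sum - (l.map g).sum := by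
  induction l with
  | nil => simp
  | cons x l ih => simp [ih]; ring

theorem pv_zip_take (cs as0 : List Char) :
    cs.zip (as0.take cs.length) = cs.zip as0 := by
  induction cs generalizing as0 with
  | nil => simp
  | cons c cs ih =>
    cases as0 with
    | nil => simp
    | cons a as0 => simp [List.zip_cons_cons, ih]

theorem pv_main (s a : String) (hpre : s.toList.length ≤ a.toList.length) :
    check_strike_ball s a = check_strike_ball_alt s a := by
  unfold check_strike_ball check_strike_ball_alt
  have hlen : PySem.Str.len s = ((s.toList.length : Nat) : Int) := by simp [pysem]
  rw [hlen, PySem.List.pyRange_zero_natCast]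
  -- normalize A's fold to Nat-indexed folds
  rw [List.foldl_map]
  simp only [List.foldl_map, PySem.Str.pyGet?_natCast, Nat.cast_inj]
  -- B side: the slice is take, the zip drops the take
  have hans : (PySem.Str.slice a none (some ((s.toList.length : Nat) : Int))).toList
      = a.toList.take s.toList.length := by simp [pysem]
  rw [hans, pv_zip_take]
  -- A's outer loop via pv_inner
  have houter := PySem.List.foldl_congr_mem (l := List.range s.toList.length)
      (init := ((0, 0) : Int × Int))
      (f := fun (st : Int × Int) i =>
        List.foldl (fun (st : Int × Int) j =>
          if s.toList[i]? = a.toList[j]? then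
            if i = j then (st.1 + 1, st.2) else (st.1, st.2 + 1) else st)
          st (List.range s.toList.length))
      (g := fun (st : Int × Int) i =>
        (st.1 + (((List.range s.toList.length).map
            (fun j => if s.toList[i]? = a.toList[j]? ∧ i = j then (1:Int) else 0)).sum),
         st.2 + (((List.range s.toList.length).map
            (fun j => if s.toList[i]? = a.toList[j]? ∧ i ≠ j then (1:Int) else 0)).sum)))
      (by intro st i hi; cases st; exact pv_inner _ _ _ _ _ _)
  rw [houter, PySem.List.foldl_prod_mk
      (f := fun acc i => acc + (((List.range s.toList.length).map
          (fun j => if s.toList[i]? = a.toList[j]? ∧ i = j then (1:Int) else 0)).sum))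
      (g := fun acc i => acc + (((List.range s.toList.length).map
          (fun j => if s.toList[i]? = a.toList[j]? ∧ i ≠ j then (1:Int) else 0)).sum)),
    PySem.List.foldl_add, PySem.List.foldl_add]
  -- B's strike pass is a zip count
  rw [PySem.List.foldl_ite_add_one (p := fun (p : Char × Char) => p.1 = p.2)]
  -- B's dict lookups are counts in answer[:n]
  simp only [PySem.Dict.getD_foldl_insert_add_one, PySem.Dict.getD_empty, zero_add]
  rw [PySem.List.foldl_add (g := fun c => ((a.toList.take s.toList.length).count c : Int))]
  -- A's strike sum is B's zip count
  have hS : ((List.range s.toList.length).map (fun i =>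
        ((List.range s.toList.length).map
          (fun j => if s.toList[i]? = a.toList[j]? ∧ i = j then (1:Int) else 0)).sum)).sum
      = ((s.toList.zip a.toList).countP (fun p => decide (p.1 = p.2)) : Int) := by
    have h1 : ∀ i ∈ List.range s.toList.length,
        ((List.range s.toList.length).map
          (fun j => if s.toList[i]? = a.toList[j]? ∧ i = j then (1:Int) else 0)).sum
        = if s.toList[i]? = a.toList[i]? then (1:Int) else 0 := by
      intro i hi
      rw [pv_sum_ite_eq]
      have hi' : i < s.toList.length := List.mem_range.mp hi
      have hiff : (i < s.toList.length ∧ s.toList[i]? = a.toList[i]?)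
          ↔ (s.toList[i]? = a.toList[i]?) := ⟨And.right, fun h => ⟨hi', h⟩⟩
      rw [if_congr hiff rfl rfl]
    rw [List.map_congr_left h1, pv_zip s.toList a.toList hpre]
  -- A's per-position totals sum to B's dictionary total
  have hT : ((List.range s.toList.length).map (fun i =>
        ((List.range s.toList.length).map
          (fun j => if s.toList[i]? = a.toList[j]? then (1:Int) else 0)).sum)).sum
      = (s.toList.map (fun c => ((a.toList.take s.toList.length).count c : Int))).sum := by
    have h1 : ∀ i ∈ List.range s.toList.length,
        ((List.range s.toList.length).map
          (fun j => if s.toList[i]? = a.toList[j]? then (1:Int) else 0)).sum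
        = (fun (o : Option Char) =>
            o.elim 0 (fun v => ((a.toList.take s.toList.length).count v : Int))) s.toList[i]? := by
      intro i hi
      have hi' := List.mem_range.mp hi
      rw [List.getElem?_eq_getElem hi']
      exact pv_count a.toList s.toList.length hpre _
    rw [List.map_congr_left h1, pv_map_range s.toList
      (fun o => o.elim 0 (fun v => ((a.toList.take s.toList.length).count v : Int)))]
    rfl
  -- A's ball sum is total minus strike, per position
  have hB : ((List.range s.toList.length).map (fun i =>
        ((List.range s.toList.length).map
          (fun j => if s.toList[i]? = a.toList[j]? ∧ i ≠ j then (1:Int) else 0)).sum)).sum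
      = ((List.range s.toList.length).map (fun i =>
          ((List.range s.toList.length).map
            (fun j => if s.toList[i]? = a.toList[j]? then (1:Int) else 0)).sum)).sum
        - ((List.range s.toList.length).map (fun i =>
          ((List.range s.toList.length).map
            (fun j => if s.toList[i]? = a.toList[j]? ∧ i = j then (1:Int) else 0)).sum)).sum := by
    rw [← pv_sum_map_sub]
    apply congrArg
    apply List.map_congr_left
    intro i _
    rw [← pv_sum_map_sub]
    apply congrArg
    apply List.map_congr_left
    intro j _
    by_cases hP : s.toList[i]? = a.toList[j]?
    · by_cases he : i = j
      · rw [if_neg (fun h => h.2 he), if_pos hP, if_pos ⟨hP, he⟩]; norm_num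
      · rw [if_pos ⟨hP, he⟩, if_pos hP, if_neg (fun h => he h.2)]; norm_num
    · rw [if_neg (fun h => hP h.1), if_neg hP, if_neg (fun h => hP h.1)]; norm_num
  simp only [zero_add, String.length_toList] at hS hT hB ⊢
  rw [hB, hT, hS]

-- ===== VERDICT (by name: the statement is the Claim_ definition above) =====
theorem check_strike_ball_spec : Claim_equal_check_strike_ball := by
  intro s a _ hpre
  unfold Pre_check_strike_ball at hpre
  unfold Spec_check_strike_ball
  exact pv_main s a hpre
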